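-- pv_equiv track=rewrite | github.com/cubernetes/aoc2024 | 12/solution2-counting-corners.py | calc_price
-- ===== SOURCE A (Python) =====
-- D=[(-1,0),(+1,0),(0,-1),(0,+1)]
--
-- turn_clock_wise={(-1,0):(0,1), (0,1):(+1,0), (+1,0):(0,-1), (0,-1):(-1,0)}
--
-- def calc_price(region: set[tuple[int,int]]) -> int:
--     area=0
--     n_sides=0
--     for i,j in region:
--         area+=1
--         for d in D:
--             di,dj=d
--             ni,nj=i+di,j+dj
--             cdi,cdj=turn_clock_wise[(di,dj)]
--             cni,cnj=i+cdi,j+cdj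
--             if (ni,nj) not in region and (cni,cnj) not in region:
--                 n_sides += 1
--             elif (ni,nj) in region and (cni,cnj) in region and (ni+cdi,nj+cdj) not in region:
--                 n_sides += 1
--     return area*n_sides
-- ===== SOURCE B (Python) =====
-- def calc_price(region: set[tuple[int, int]]) -> int:
--     # Vertex-based corner counting: the number of sides of a region equals its
--     # number of corners; count corners at grid vertices instead of per cell.
--     area = len(region)
--     verts = {(i + a, j + b) for (i, j) in region for a in (0, 1) for b in (0, 1)}
--     corners = 0
--     for (vi, vj) in verts:
--         nw = (vi - 1, vj - 1) in region
--         ne = (vi - 1, vj) in region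
--         sw = (vi, vj - 1) in region
--         se = (vi, vj) in region
--         k = nw + ne + sw + se
--         if k == 1 or k == 3:
--             corners += 1
--         elif k == 2 and nw == se:
--             corners += 2
--     return area * corners
-- ===== Notes on version B (the rewrite author's own statement) =====
-- stated objective: alternative
-- what changed: Instead of A's per-cell, per-direction side counting (convex/concave tests against rotated neighbours), B takes area = len(region) directly and counts corners at grid vertices: each vertex looks at its four surrounding cells and contributes 1 for one or three present cells and 2 for a diagonal pair.
import Mathlib
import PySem

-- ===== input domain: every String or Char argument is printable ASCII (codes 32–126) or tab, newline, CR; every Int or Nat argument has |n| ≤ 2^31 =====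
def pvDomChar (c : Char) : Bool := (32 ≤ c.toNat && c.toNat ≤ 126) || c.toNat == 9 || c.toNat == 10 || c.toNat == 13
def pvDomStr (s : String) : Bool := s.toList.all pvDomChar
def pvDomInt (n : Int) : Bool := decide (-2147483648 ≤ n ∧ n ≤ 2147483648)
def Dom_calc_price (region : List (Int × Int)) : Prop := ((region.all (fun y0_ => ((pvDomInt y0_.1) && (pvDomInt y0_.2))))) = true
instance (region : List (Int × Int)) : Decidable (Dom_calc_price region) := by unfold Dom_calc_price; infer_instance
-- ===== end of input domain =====

-- B replaces A's per-cell directional side counting by counting corners at grid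
-- vertices (1 corner for 1 or 3 adjacent region cells, 2 for a diagonal pair);
-- objective: alternative decomposition of the same O(n) count.


-- ===== PORT A =====
def pyD : List (Int × Int) := [(-1, 0), (1, 0), (0, -1), (0, 1)]

def turn_clock_wise : PySem.Dict (Int × Int) (Int × Int) :=
  PySem.Dict.ofList [((-1, 0), (0, 1)), ((0, 1), (1, 0)), ((1, 0), (0, -1)), ((0, -1), (-1, 0))]

-- body of A's inner 'for d in D' loop (the key is always present, so getD is exact)
def calcDir (region : List (Int × Int)) (ij : Int × Int) (n_sides : Int) (d : Int × Int) : Int :=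
  let ni := ij.1 + d.1
  let nj := ij.2 + d.2
  let cd := PySem.Dict.getD turn_clock_wise d (0, 0)
  let cni := ij.1 + cd.1
  let cnj := ij.2 + cd.2
  if (ni, nj) ∉ region ∧ (cni, cnj) ∉ region then n_sides + 1
  else if (ni, nj) ∈ region ∧ (cni, cnj) ∈ region ∧ (ni + cd.1, nj + cd.2) ∉ region then n_sides + 1
  else n_sides

-- body of A's outer 'for i,j in region' loop; state = (area, n_sides)
def calcCell (region : List (Int × Int)) (st : Int × Int) (ij : Int × Int) : Int × Int :=
  (st.1 + 1, pyD.foldl (calcDir region ij) st.2)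

def calc_price (region : List (Int × Int)) : Int :=
  let st := region.foldl (calcCell region) ((0 : Int), (0 : Int))
  st.1 * st.2

-- ===== PORT B =====
-- the four grid vertices incident to cell ij (B's set comprehension, in order)
def cellVerts (ij : Int × Int) : List (Int × Int) :=
  [(ij.1, ij.2), (ij.1, ij.2 + 1), (ij.1 + 1, ij.2), (ij.1 + 1, ij.2 + 1)]

-- body of B's 'for (vi,vj) in verts' loop
def vertCorners (region : List (Int × Int)) (corners : Int) (v : Int × Int) : Int :=
  let nw := (v.1 - 1, v.2 - 1) ∈ region
  let ne := (v.1 - 1, v.2) ∈ region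
  let sw := (v.1, v.2 - 1) ∈ region
  let se := (v.1, v.2) ∈ region
  let k : Int := (if nw then 1 else 0) + (if ne then 1 else 0) + (if sw then 1 else 0) + (if se then 1 else 0)
  if k = 1 ∨ k = 3 then corners + 1
  else if k = 2 ∧ (nw ↔ se) then corners + 2
  else corners

def calc_price_alt (region : List (Int × Int)) : Int :=
  let area : Int := region.length
  let verts : PySem.Set (Int × Int) := PySem.Set.ofList (region.flatMap cellVerts)
  let corners := verts.foldl (vertCorners region) 0
  area * corners

-- ===== PRECONDITION & SPEC =====
-- Pre_ states the encoding invariant of the Python parameter 'region: set[tuple[int,int]]':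
-- the list holds the set's DISTINCT elements (a list with duplicates encodes no Python set).
def Pre_calc_price (region : List (Int × Int)) : Prop := region.Nodup
instance (region : List (Int × Int)) : Decidable (Pre_calc_price region) := by unfold Pre_calc_price; infer_instance
def pvWitness_calc_price : (List (Int × Int)) := [(0, 0), (0, 1), (1, 1)]

def Spec_calc_price (region : List (Int × Int)) (out : Int) : Prop := out = calc_price_alt region
instance (region : List (Int × Int)) (out : Int) : Decidable (Spec_calc_price region out) := by unfold Spec_calc_price; infer_instance

-- ===== CLAIM (what is proved, stated in full; the proofs are below) =====
def Claim_equal_calc_price : Prop := ∀ (region : List (Int × Int)), Dom_calc_price region → Pre_calc_price region → Spec_calc_price region (calc_price region)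

-- ===== LEMMAS AND PROOFS =====

-- contribution of one cell c at incident vertex v, expressed through the three other
-- cells of v's 2×2 block (row mate, column mate, diagonal mate of c across v)
def contribAt (R : List (Int × Int)) (c v : Int × Int) : Int :=
  if (2 * v.1 - 1 - c.1, c.2) ∉ R ∧ (c.1, 2 * v.2 - 1 - c.2) ∉ R then 1
  else if (2 * v.1 - 1 - c.1, c.2) ∈ R ∧ (c.1, 2 * v.2 - 1 - c.2) ∈ R ∧ (2 * v.1 - 1 - c.1, 2 * v.2 - 1 - c.2) ∉ R then 1
  else 0

def cellA (R : List (Int × Int)) (c : Int × Int) : Int := pyD.foldl (calcDir R c) 0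

def vCnt (R : List (Int × Int)) (v : Int × Int) : Int := vertCorners R 0 v

-- the four cells of the 2×2 block around vertex v
def cells4 (v : Int × Int) : List (Int × Int) :=
  [(v.1 - 1, v.2 - 1), (v.1 - 1, v.2), (v.1, v.2 - 1), (v.1, v.2)]

theorem calcDir_shift (R : List (Int × Int)) (c : Int × Int) (ns : Int) (d : Int × Int) :
    calcDir R c ns d = ns + calcDir R c 0 d := by
  simp only [calcDir]; split_ifs <;> omega

theorem foldl_calcDir_shift (R : List (Int × Int)) (c : Int × Int) (l : List (Int × Int)) (ns : Int) :
    l.foldl (calcDir R c) ns = ns + l.foldl (calcDir R c) 0 := by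
  induction l generalizing ns with
  | nil => simp
  | cons d l ih =>
      simp only [List.foldl_cons]
      rw [ih (calcDir R c ns d), ih (calcDir R c 0 d), calcDir_shift]
      omega

theorem vertCorners_shift (R : List (Int × Int)) (cr : Int) (v : Int × Int) :
    vertCorners R cr v = cr + vCnt R v := by
  simp only [vertCorners, vCnt]; split_ifs <;> omega

theorem foldl_vertCorners_shift (R : List (Int × Int)) (l : List (Int × Int)) (cr : Int) :
    l.foldl (vertCorners R) cr = cr + (l.map (vCnt R)).sum := by
  induction l generalizing cr with
  | nil => simp
  | cons v l ih =>
      simp only [List.foldl_cons, List.map_cons, List.sum_cons]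
      rw [ih (vertCorners R cr v), vertCorners_shift]
      omega

theorem foldl_calcCell (R l : List (Int × Int)) (st : Int × Int) :
    l.foldl (calcCell R) st = (st.1 + l.length, st.2 + (l.map (cellA R)).sum) := by
  induction l generalizing st with
  | nil => simp
  | cons c l ih =>
      simp only [List.foldl_cons, List.map_cons, List.sum_cons, List.length_cons]
      rw [ih]
      simp only [calcCell]
      rw [foldl_calcDir_shift R c pyD st.2]
      have hc : pyD.foldl (calcDir R c) 0 = cellA R c := rfl
      rw [hc]
      simp only [Prod.ext_iff]
      constructor <;> push_cast <;> ring

theorem calcDir_up (R : List (Int × Int)) (c : Int × Int) :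
    calcDir R c 0 (-1, 0) = contribAt R c (c.1, c.2 + 1) := by
  have hd : PySem.Dict.getD turn_clock_wise (-1, 0) ((0 : Int), (0 : Int)) = ((0 : Int), (1 : Int)) := rfl
  simp only [calcDir, contribAt, hd]
  norm_num
  ring_nf

theorem calcDir_down (R : List (Int × Int)) (c : Int × Int) :
    calcDir R c 0 (1, 0) = contribAt R c (c.1 + 1, c.2) := by
  have hd : PySem.Dict.getD turn_clock_wise (1, 0) ((0 : Int), (0 : Int)) = ((0 : Int), (-1 : Int)) := rfl
  simp only [calcDir, contribAt, hd]
  norm_num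
  ring_nf

theorem calcDir_left (R : List (Int × Int)) (c : Int × Int) :
    calcDir R c 0 (0, -1) = contribAt R c (c.1, c.2) := by
  have hd : PySem.Dict.getD turn_clock_wise (0, -1) ((0 : Int), (0 : Int)) = ((-1 : Int), (0 : Int)) := rfl
  simp only [calcDir, contribAt, hd]
  norm_num
  ring_nf
  split_ifs <;> tauto

theorem calcDir_right (R : List (Int × Int)) (c : Int × Int) :
    calcDir R c 0 (0, 1) = contribAt R c (c.1 + 1, c.2 + 1) := by
  have hd : PySem.Dict.getD turn_clock_wise (0, 1) ((0 : Int), (0 : Int)) = ((1 : Int), (0 : Int)) := rfl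
  simp only [calcDir, contribAt, hd]
  norm_num
  ring_nf
  split_ifs <;> tauto

theorem cellA_eq (R : List (Int × Int)) (c : Int × Int) :
    cellA R c = ((cellVerts c).map (contribAt R c)).sum := by
  simp only [cellA, pyD, cellVerts, List.foldl_cons, List.foldl_nil, List.map_cons,
    List.sum_cons, List.map_nil, List.sum_nil]
  rw [calcDir_shift R c _ (0, 1), calcDir_shift R c _ (0, -1), calcDir_shift R c _ (1, 0),
    calcDir_up, calcDir_down, calcDir_left, calcDir_right]
  ring

theorem cells4_mem_iff (c v : Int × Int) : v ∈ cellVerts c ↔ c ∈ cells4 v := by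
  simp only [cellVerts, cells4, List.mem_cons, List.not_mem_nil, or_false, Prod.ext_iff]
  constructor <;> rintro (h | h | h | h) <;> simp_all

theorem cellVerts_nodup (c : Int × Int) : (cellVerts c).Nodup := by
  simp [cellVerts, Prod.ext_iff]

theorem cells4_nodup (v : Int × Int) : (cells4 v).Nodup := by
  simp [cells4, Prod.ext_iff]

theorem vertex_local (R : List (Int × Int)) (v : Int × Int) :
    ((cells4 v).map (fun c => if c ∈ R then contribAt R c v else 0)).sum = vCnt R v := by
  simp only [cells4, vCnt, vertCorners, contribAt, List.map_cons, List.map_nil,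
    List.sum_cons, List.sum_nil]
  norm_num
  ring_nf
  by_cases h1 : (-1 + v.1, -1 + v.2) ∈ R <;>
  by_cases h2 : (-1 + v.1, v.2) ∈ R <;>
  by_cases h3 : (v.1, -1 + v.2) ∈ R <;>
  by_cases h4 : (v.1, v.2) ∈ R <;>
  simp only [h1, h2, h3, h4] <;> norm_num

theorem core (R : List (Int × Int)) (h : R.Nodup) :
    (R.map (cellA R)).sum = ((PySem.Set.ofList (R.flatMap cellVerts)).map (vCnt R)).sum := by
  have hvnd : (PySem.Set.ofList (R.flatMap cellVerts) : List (Int × Int)).Nodup :=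
    PySem.Set.nodup_ofList _
  have hV : (PySem.Set.ofList (R.flatMap cellVerts) : List (Int × Int)).toFinset =
      R.toFinset.biUnion (fun c => (cellVerts c).toFinset) := by
    ext v
    simp [PySem.Set.mem_ofList, List.mem_flatMap, Finset.mem_biUnion]
  set V : Finset (Int × Int) := R.toFinset.biUnion (fun c => (cellVerts c).toFinset) with hVdef
  calc (R.map (cellA R)).sum
      = R.toFinset.sum (cellA R) := (List.sum_toFinset _ h).symm
    _ = R.toFinset.sum (fun c => (cellVerts c).toFinset.sum (contribAt R c)) := by
        refine Finset.sum_congr rfl (fun c _ => ?_)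
        rw [cellA_eq, List.sum_toFinset _ (cellVerts_nodup c)]
    _ = R.toFinset.sum (fun c => V.sum (fun v => if v ∈ (cellVerts c).toFinset then contribAt R c v else 0)) := by
        refine Finset.sum_congr rfl (fun c hc => ?_)
        rw [Finset.sum_ite_mem, Finset.inter_eq_right.mpr]
        intro v hv
        exact Finset.mem_biUnion.mpr ⟨c, hc, hv⟩
    _ = V.sum (fun v => R.toFinset.sum (fun c => if v ∈ (cellVerts c).toFinset then contribAt R c v else 0)) :=
        Finset.sum_comm
    _ = V.sum (fun v => R.toFinset.sum (fun c => if c ∈ (cells4 v).toFinset then contribAt R c v else 0)) := by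
        refine Finset.sum_congr rfl (fun v _ => Finset.sum_congr rfl (fun c _ => ?_))
        simp only [List.mem_toFinset, cells4_mem_iff]
    _ = V.sum (fun v => (cells4 v).toFinset.sum (fun c => if c ∈ R.toFinset then contribAt R c v else 0)) := by
        refine Finset.sum_congr rfl (fun v _ => ?_)
        rw [Finset.sum_ite_mem, Finset.sum_ite_mem, Finset.inter_comm]
    _ = V.sum (vCnt R) := by
        refine Finset.sum_congr rfl (fun v _ => ?_)
        rw [← vertex_local R v, List.sum_toFinset _ (cells4_nodup v)]
        simp only [List.mem_toFinset]
    _ = ((PySem.Set.ofList (R.flatMap cellVerts)).map (vCnt R)).sum := by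
        rw [← hV, List.sum_toFinset _ hvnd]

-- ===== VERDICT (by name: the statement is the Claim_ definition above) =====
theorem calc_price_spec : Claim_equal_calc_price := by
  intro region _ hpre
  unfold Spec_calc_price calc_price calc_price_alt
  rw [foldl_calcCell]
  simp only [foldl_vertCorners_shift, zero_add]
  rw [core region hpre]
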